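-- pv_equiv track=rewrite | github.com/moon088/Atcoder | Contest/Biginer/Factorial and Multiple.py | min_N_for_factorial
-- ===== SOURCE A (Python) =====
-- def min_N_for_factorial(factor, count):
--     """ count 回素因数を含む N を求める """
--     x = 0
--     while count > 0:
--         x += factor
--         temp = x
--         while temp % factor == 0:
--             count -= 1
--             temp //= factor
--     return x
-- ===== SOURCE B (Python) =====
-- def min_N_for_factorial(factor, count):
--     """ count 回素因数を含む N を求める """
--     if count <= 0:
--         return 0
--
--     def consumed(m):
--         # total multiplicity of `factor` in the first m multiples of `factor`:
--         # m + sum_{j>=1} floor(m / factor**j)   (Legendre-style sum)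
--         total, p = m, factor
--         while p <= m:
--             total += m // p
--             p *= factor
--         return total
--
--     hi = 1
--     while consumed(hi) < count:
--         hi *= 2
--     lo = 1
--     while lo < hi:
--         mid = (lo + hi) // 2
--         if consumed(mid) >= count:
--             hi = mid
--         else:
--             lo = mid + 1
--     return lo * factor
-- ===== Notes on version B (the rewrite author's own statement) =====
-- stated objective: faster
-- what changed: A scans multiples of factor one by one, factoring each; B binary-searches the number m of multiples needed using a Legendre-style divisor sum (consumed(m) = m + sum of m//factor^j), so the answer is found in O(log^2(answer)) divisor-sum evaluations instead of O(answer/factor) trial factorizations.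
-- outside the precondition, e.g. on min_N_for_factorial(-2, 1): A returns -2, B returns -4
import Mathlib
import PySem

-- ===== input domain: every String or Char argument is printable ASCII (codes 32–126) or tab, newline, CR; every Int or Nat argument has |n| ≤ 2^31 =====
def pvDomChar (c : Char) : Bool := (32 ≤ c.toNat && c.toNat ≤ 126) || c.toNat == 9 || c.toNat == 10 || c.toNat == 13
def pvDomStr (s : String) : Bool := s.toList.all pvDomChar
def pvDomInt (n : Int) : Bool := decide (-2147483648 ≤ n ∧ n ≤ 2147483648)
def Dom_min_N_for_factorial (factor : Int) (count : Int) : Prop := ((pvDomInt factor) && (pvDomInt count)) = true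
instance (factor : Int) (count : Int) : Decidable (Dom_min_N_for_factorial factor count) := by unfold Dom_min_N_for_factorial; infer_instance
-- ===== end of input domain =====

-- B replaces A's one-by-one scan over multiples of `factor` with a binary search over the
-- number of multiples, using a Legendre-style divisor sum; equivalence is proved on factor ≥ 2
-- (or count ≤ 0), the function's natural domain.  Loops are ported with a fuel argument that
-- provably suffices on every admitted input (fuel only makes the recursion structural).

-- ===== PORT A =====
-- inner `while temp % factor == 0` loop of A (fuel ≥ temp.toNat suffices: temp shrinks each turn)
def pvInnerA (factor : Int) : Nat → Int → Int → Int × Int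
  | 0, temp, count => (temp, count)
  | fuel + 1, temp, count =>
    if PySem.Int.mod temp factor = 0 then
      pvInnerA factor fuel (PySem.Int.floordiv temp factor) (count - 1)
    else (temp, count)

-- outer `while count > 0` loop of A (count drops by ≥ 1 per turn, so fuel = count.toNat suffices)
def pvOuterA (factor : Int) : Nat → Int → Int → Int
  | 0, _, x => x
  | fuel + 1, count, x =>
    if 0 < count then
      pvOuterA factor fuel (pvInnerA factor (x + factor).toNat (x + factor) count).2 (x + factor)
    else x

def min_N_for_factorial (factor : Int) (count : Int) : Int :=
  pvOuterA factor count.toNat count 0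

-- ===== PORT B =====
-- `while p <= m: total += m // p; p *= factor` loop of B's consumed() (p at least doubles)
def pvLegB (factor : Int) (m : Int) : Nat → Int → Int → Int
  | 0, total, _ => total
  | fuel + 1, total, p =>
    if p ≤ m then pvLegB factor m fuel (total + PySem.Int.floordiv m p) (p * factor)
    else total

-- consumed(m) of B: total multiplicity of `factor` in the first m multiples of `factor`
def pvConsumed (factor : Int) (m : Int) : Int :=
  pvLegB factor m (m.toNat + 1) m factor

-- `hi = 1; while consumed(hi) < count: hi *= 2` loop of B (hi at least doubles towards count)
def pvGrowB (factor : Int) (count : Int) : Nat → Int → Int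
  | 0, hi => hi
  | fuel + 1, hi =>
    if pvConsumed factor hi < count then pvGrowB factor count fuel (hi * 2) else hi

-- `while lo < hi` bisection loop of B (the gap hi - lo shrinks each turn)
def pvBisectB (factor : Int) (count : Int) : Nat → Int → Int → Int
  | 0, lo, _ => lo
  | fuel + 1, lo, hi =>
    if lo < hi then
      let mid := PySem.Int.floordiv (lo + hi) 2
      if pvConsumed factor mid ≥ count then pvBisectB factor count fuel lo mid
      else pvBisectB factor count fuel (mid + 1) hi
    else lo

def min_N_for_factorial_alt (factor : Int) (count : Int) : Int :=
  if count ≤ 0 then 0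
  else
    let hi := pvGrowB factor count count.toNat 1
    pvBisectB factor count (hi - 1).toNat 1 hi * factor

-- ===== PRECONDITION & SPEC =====
-- Pre_ excludes factor ≤ 1 with count > 0: there A raises ZeroDivisionError (factor = 0),
-- loops forever (factor = 1), or — for negative factor — returns a value that is an accident of
-- Python's floor division on negatives, a corner no caller of this factorial helper specifies.
def Pre_min_N_for_factorial (factor : Int) (count : Int) : Prop := 2 ≤ factor ∨ count ≤ 0
instance (factor : Int) (count : Int) : Decidable (Pre_min_N_for_factorial factor count) := by
  unfold Pre_min_N_for_factorial; infer_instance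

def pvWitness_min_N_for_factorial : Int × Int := (2, 3)

def Spec_min_N_for_factorial (factor : Int) (count : Int) (out : Int) : Prop := out = min_N_for_factorial_alt factor count
instance (factor : Int) (count : Int) (out : Int) : Decidable (Spec_min_N_for_factorial factor count out) := by unfold Spec_min_N_for_factorial; infer_instance

-- ===== CLAIM (what is proved, stated in full; the proofs are below) =====
def Claim_equal_min_N_for_factorial : Prop := ∀ (factor : Int) (count : Int), Dom_min_N_for_factorial factor count → Pre_min_N_for_factorial factor count → Spec_min_N_for_factorial factor count (min_N_for_factorial factor count)

-- ===== LEMMAS AND PROOFS =====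

-- proof-side helpers: the bare divisor sum Σ_{p·f^j ≤ m} m // (p·f^j) …
def pvS (f m p : Int) : Int :=
  if h : 2 ≤ f ∧ 1 ≤ p ∧ p ≤ m then PySem.Int.floordiv m p + pvS f m (p * f) else 0
termination_by (m + 1 - p).toNat
decreasing_by
  have h0 : p * 2 ≤ p * f := mul_le_mul_of_nonneg_left h.1 (by omega)
  omega

-- … the number of chain members p·f^j (j ≥ 0) dividing m …
def pvCnt (f m p : Int) : Int :=
  if h : 2 ≤ f ∧ 1 ≤ p ∧ p ≤ m then (if p ∣ m then 1 else 0) + pvCnt f m (p * f) else 0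
termination_by (m + 1 - p).toNat
decreasing_by
  have h0 : p * 2 ≤ p * f := mul_le_mul_of_nonneg_left h.1 (by omega)
  omega

-- … and the f-adic multiplicity of t (the number of iterations of A's inner loop)
def pvNu (f t : Int) : Int :=
  if h : 2 ≤ f ∧ 0 < t ∧ f ∣ t then 1 + pvNu f (t / f) else 0
termination_by t.toNat
decreasing_by
  have h0 : t * 1 < t * f := mul_lt_mul_of_pos_left (by omega) h.2.1
  have h1 : t / f < t := Int.ediv_lt_of_lt_mul (by omega) (by omega)
  have h2 : 0 ≤ t / f := Int.ediv_nonneg (by omega) (by omega)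
  omega

theorem pvNu_nonneg (f t : Int) : 0 ≤ pvNu f t := by
  fun_induction pvNu with
  | case1 t h ih => omega
  | case2 => simp

theorem pvLegB_ge (f m : Int) (hf : 2 ≤ f) (hm : 0 ≤ m) :
    ∀ (fuel : Nat) (total p : Int), 1 ≤ p → total ≤ pvLegB f m fuel total p := by
  intro fuel
  induction fuel with
  | zero => intro total p _; simp [pvLegB]
  | succ n ih =>
    intro total p hp
    rw [pvLegB]
    split_ifs with hpm
    · have h0 : 0 ≤ PySem.Int.floordiv m p := by
        rw [PySem.Int.floordiv_eq_ediv_of_pos (by omega : (0:Int) < p)]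
        exact Int.ediv_nonneg hm (by omega)
      have := ih (total + PySem.Int.floordiv m p) (p * f)
        (by have := mul_le_mul_of_nonneg_left hf (by omega : (0:Int) ≤ p); omega)
      omega
    · exact le_refl total

theorem pvConsumed_ge (f m : Int) (hf : 2 ≤ f) (hm : 0 ≤ m) : m ≤ pvConsumed f m :=
  pvLegB_ge f m hf hm (m.toNat + 1) m f (by omega)

theorem pvLegB_eq_S (f m : Int) (hf : 2 ≤ f) :
    ∀ (fuel : Nat) (total p : Int), 1 ≤ p → (m + 1 - p).toNat ≤ fuel →
      pvLegB f m fuel total p = total + pvS f m p := by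
  intro fuel
  induction fuel with
  | zero =>
    intro total p hp hle
    rw [pvLegB, pvS, dif_neg (by omega)]
    ring
  | succ n ih =>
    intro total p hp hle
    rw [pvLegB]
    split_ifs with hpm
    · have h0 : p * 2 ≤ p * f := mul_le_mul_of_nonneg_left hf (by omega)
      rw [ih (total + PySem.Int.floordiv m p) (p * f) (by omega) (by omega)]
      conv_rhs => rw [pvS]
      rw [dif_pos ⟨hf, hp, hpm⟩]
      ring
    · rw [pvS, dif_neg (by omega)]
      ring

theorem pvConsumed_eq (f m : Int) (hf : 2 ≤ f) : pvConsumed f m = m + pvS f m f :=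
  pvLegB_eq_S f m hf (m.toNat + 1) m f (by omega) (by omega)

-- m / q steps by exactly [q ∣ m] when m goes from m-1 to m
theorem ediv_succ (q m : Int) (hq : 1 ≤ q) :
    m / q = (m - 1) / q + (if q ∣ m then 1 else 0) := by
  have h0 := Int.ediv_add_emod (m - 1) q
  have h1 := Int.emod_nonneg (m - 1) (by omega : q ≠ 0)
  have h2 := Int.emod_lt_of_pos (m - 1) (by omega : 0 < q)
  set e := (m - 1) / q with he
  set r := (m - 1) % q with hr
  by_cases hd : q ∣ m
  · obtain ⟨k, hk⟩ := hd
    rw [if_pos ⟨k, hk⟩, hk, Int.mul_ediv_cancel_left _ (by omega : q ≠ 0)]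
    have hqe : q * (k - e) = r + 1 := by linarith
    rcases lt_trichotomy (k - e) 1 with h | h | h
    · nlinarith
    · omega
    · nlinarith
  · rw [if_neg hd]
    have hrq : r + 1 < q ∨ r + 1 = q := by omega
    rcases hrq with h | h
    · have : m = (r + 1) + e * q := by linarith
      rw [this, Int.add_mul_ediv_right _ _ (by omega : q ≠ 0),
        Int.ediv_eq_zero_of_lt (by omega) (by omega)]
      omega
    · exact absurd ⟨e + 1, by linarith⟩ hd

theorem pvS_diff (f m p : Int) (hf : 2 ≤ f) (hp : 1 ≤ p) (hm : 1 ≤ m) :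
    pvS f m p = pvS f (m - 1) p + pvCnt f m p := by
  have H : ∀ n : Nat, ∀ p : Int, 1 ≤ p → (m + 1 - p).toNat = n →
      pvS f m p = pvS f (m - 1) p + pvCnt f m p := by
    intro n
    induction n using Nat.strong_induction_on with
    | _ n ih =>
      intro p hp hn
      by_cases hpm : p ≤ m
      · have hpf1 : (1:Int) ≤ p * f := by nlinarith
        have hpf2 : p * 2 ≤ p * f := by nlinarith
        rw [pvS, dif_pos ⟨hf, hp, hpm⟩, pvCnt, dif_pos ⟨hf, hp, hpm⟩]
        have ihpf : pvS f m (p * f) = pvS f (m - 1) (p * f) + pvCnt f m (p * f) :=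
          ih _ (by omega) (p * f) hpf1 rfl
        by_cases hpm1 : p ≤ m - 1
        · rw [show pvS f (m-1) p = PySem.Int.floordiv (m-1) p + pvS f (m-1) (p*f) from by
            rw [pvS, dif_pos ⟨hf, hp, hpm1⟩]]
          rw [PySem.Int.floordiv_eq_ediv_of_pos (by omega : (0:Int) < p),
            PySem.Int.floordiv_eq_ediv_of_pos (by omega : (0:Int) < p), ihpf]
          have hdiv := ediv_succ p m hp
          split_ifs at hdiv ⊢ with hd
          · omega
          · omega
        · have hpm2 : p = m := by omega
          have hbig : ¬ (2 ≤ f ∧ 1 ≤ p * f ∧ p * f ≤ m) := by intro hcon; omega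
          rw [show pvS f m (p*f) = 0 from by rw [pvS, dif_neg hbig]]
          rw [show pvCnt f m (p*f) = 0 from by rw [pvCnt, dif_neg hbig]]
          rw [show pvS f (m-1) p = 0 from by rw [pvS, dif_neg (by omega)]]
          rw [if_pos (hpm2 ▸ dvd_refl p),
            PySem.Int.floordiv_eq_ediv_of_pos (by omega : (0:Int) < p), hpm2,
            Int.ediv_self (by omega : m ≠ 0)]
          ring
      · rw [show pvS f m p = 0 from by rw [pvS, dif_neg (by omega)]]
        rw [show pvCnt f m p = 0 from by rw [pvCnt, dif_neg (by omega)]]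
        rw [show pvS f (m-1) p = 0 from by rw [pvS, dif_neg (by omega)]]
        ring
  exact H _ p hp rfl

theorem pvCnt_zero (f m p q : Int) (hf : 2 ≤ f) (hm : 1 ≤ m) (hnd : ¬ f ∣ m) (hp : 1 ≤ p)
    (hq : ∃ r, 1 ≤ r ∧ q = p * (f * r)) : pvCnt f (m * p) q = 0 := by
  have H : ∀ n : Nat, ∀ q : Int, (∃ r, 1 ≤ r ∧ q = p * (f * r)) → (m * p + 1 - q).toNat = n →
      pvCnt f (m * p) q = 0 := by
    intro n
    induction n using Nat.strong_induction_on with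
    | _ n ih =>
      rintro q ⟨r, hr, hqr⟩ hn
      by_cases hg : 2 ≤ f ∧ 1 ≤ q ∧ q ≤ m * p
      · rw [pvCnt, dif_pos hg]
        have hq2 : q * 2 ≤ q * f := by nlinarith [hg.2.1]
        have hndvd : ¬ q ∣ m * p := by
          rintro ⟨k, hk⟩
          rw [hqr] at hk
          have hpm : p * m = p * (f * (r * k)) := by linear_combination hk
          exact hnd ⟨r * k, mul_left_cancel₀ (show p ≠ 0 by omega) hpm⟩
        rw [if_neg hndvd, ih _ (by omega) (q * f) ⟨r * f, by nlinarith, by rw [hqr]; ring⟩ rfl]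
        ring
      · rw [pvCnt, dif_neg hg]
  exact H _ q hq rfl

theorem pvCnt_mul (f m p : Int) (hf : 2 ≤ f) (hm : 1 ≤ m) (hp : 1 ≤ p) :
    pvCnt f (m * p) (p * f) = pvNu f m := by
  have H : ∀ n : Nat, ∀ m p : Int, 1 ≤ m → 1 ≤ p → m.toNat = n →
      pvCnt f (m * p) (p * f) = pvNu f m := by
    intro n
    induction n using Nat.strong_induction_on with
    | _ n ih =>
      intro m p hm hp hn
      by_cases hd : f ∣ m
      · obtain ⟨k, hk⟩ := hd
        have hk1 : 1 ≤ k := by nlinarith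
        have hfm : f ≤ m := by nlinarith
        have hg : 2 ≤ f ∧ 1 ≤ p * f ∧ p * f ≤ m * p := by
          refine ⟨hf, by nlinarith, by nlinarith⟩
        have hkm : k < m := by nlinarith
        rw [pvCnt, dif_pos hg, if_pos ⟨k, by rw [hk]; ring⟩]
        rw [show m * p = k * (p * f) from by rw [hk]; ring]
        rw [ih k.toNat (by omega) k (p * f) hk1 (by nlinarith) rfl]
        conv_rhs => rw [pvNu]
        rw [dif_pos ⟨hf, by omega, ⟨k, hk⟩⟩, hk,
          Int.mul_ediv_cancel_left _ (show f ≠ 0 by omega)]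
      · rw [pvNu, dif_neg (by rintro ⟨_, _, hcon⟩; exact hd hcon)]
        exact pvCnt_zero f m p (p * f) hf hm hd hp ⟨1, le_refl 1, by ring⟩
  exact H _ m p hm hp rfl

theorem pvCnt_eq_nu (f m : Int) (hf : 2 ≤ f) (hm : 1 ≤ m) : pvCnt f m f = pvNu f m := by
  have := pvCnt_mul f m 1 hf hm (by norm_num)
  simpa using this

-- the step identity: consumed(m) = consumed(m-1) + 1 + ν_f(m)
theorem pvConsumed_step (f m : Int) (hf : 2 ≤ f) (hm : 1 ≤ m) :
    pvConsumed f m = pvConsumed f (m - 1) + 1 + pvNu f m := by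
  rw [pvConsumed_eq f m hf, pvConsumed_eq f (m - 1) hf,
    pvS_diff f m f hf (by omega) hm, pvCnt_eq_nu f m hf hm]
  ring

theorem pvConsumed_mono (f a b : Int) (hf : 2 ≤ f) (ha : 0 ≤ a) (hab : a ≤ b) :
    pvConsumed f a ≤ pvConsumed f b := by
  have H : ∀ n : Nat, ∀ b : Int, a ≤ b → (b - a).toNat = n → pvConsumed f a ≤ pvConsumed f b := by
    intro n
    induction n using Nat.strong_induction_on with
    | _ n ih =>
      intro b hab hn
      rcases eq_or_lt_of_le hab with h | h
      · rw [h]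
      · have hstep := pvConsumed_step f b hf (by omega)
        have hnu := pvNu_nonneg f b
        have := ih _ (by omega) (b - 1) (by omega) rfl
        omega
  exact H _ b hab rfl

theorem pvConsumed_zero (f : Int) (hf : 2 ≤ f) : pvConsumed f 0 = 0 := by
  rw [pvConsumed_eq f 0 hf, pvS, dif_neg (by omega)]
  ring

-- A's inner loop subtracts exactly ν_f(temp) (fuel ≥ temp.toNat suffices)
theorem pvInnerA_eq (f : Int) (hf : 2 ≤ f) :
    ∀ (fuel : Nat) (t c : Int), 0 < t → t.toNat ≤ fuel →
      (pvInnerA f fuel t c).2 = c - pvNu f t := by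
  intro fuel
  induction fuel with
  | zero => intro t c ht hle; omega
  | succ n ih =>
    intro t c ht hle
    rw [pvInnerA]
    split_ifs with hmod
    · obtain ⟨k, hk⟩ := (PySem.Int.mod_eq_zero_iff_dvd t f).1 hmod
      have hk1 : 1 ≤ k := by nlinarith
      have hkt : k < t := by nlinarith
      have htf : PySem.Int.floordiv t f = k := by
        rw [PySem.Int.floordiv_eq_ediv_of_pos (by omega : (0:Int) < f), hk,
          Int.mul_ediv_cancel_left _ (by omega : f ≠ 0)]
      rw [htf, ih k (c - 1) (by omega) (by omega)]
      conv_rhs => rw [pvNu]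
      rw [dif_pos ⟨hf, ht, ⟨k, hk⟩⟩, hk, Int.mul_ediv_cancel_left _ (show f ≠ 0 by omega)]
      ring
    · rw [pvNu, dif_neg (by
        rintro ⟨_, _, h3⟩
        exact hmod ((PySem.Int.mod_eq_zero_iff_dvd t f).2 h3))]
      simp

-- ν_f((m+1)·f) = 1 + ν_f(m+1)
theorem pvNu_mul (f m : Int) (hf : 2 ≤ f) (hm : 1 ≤ m) : pvNu f (m * f) = 1 + pvNu f m := by
  rw [pvNu, dif_pos ⟨hf, by positivity, Dvd.intro m (mul_comm f m)⟩,
    Int.mul_ediv_cancel _ (by omega : f ≠ 0)]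

-- A's outer loop from state (c, m·f) returns M·f for the least M > m absorbing c more multiplicity
theorem pvOuterA_spec (f : Int) (hf : 2 ≤ f) :
    ∀ (fuel : Nat) (c m : Int), 0 ≤ m → c.toNat ≤ fuel →
    (0 < c → ∃ M, pvOuterA f fuel c (m * f) = M * f ∧ m < M ∧
        c ≤ pvConsumed f M - pvConsumed f m ∧
        ∀ M', m < M' → M' < M → pvConsumed f M' - pvConsumed f m < c) ∧
    (c ≤ 0 → pvOuterA f fuel c (m * f) = m * f) := by
  intro fuel
  induction fuel with
  | zero =>
    intro c m hm hle
    exact ⟨by omega, fun _ => rfl⟩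
  | succ n ih =>
    intro c m hm hle
    constructor
    · intro hc
      rw [pvOuterA, if_pos hc, show m * f + f = (m + 1) * f from by ring]
      set ν := pvNu f (m + 1) with hν
      have hν0 : 0 ≤ ν := pvNu_nonneg f (m + 1)
      have htpos : 0 < (m + 1) * f := by positivity
      have hinner : (pvInnerA f ((m + 1) * f).toNat ((m + 1) * f) c).2 = c - (1 + ν) := by
        rw [pvInnerA_eq f hf _ _ c htpos (le_refl _), pvNu_mul f (m + 1) hf (by omega)]
      have hstep : pvConsumed f (m + 1) = pvConsumed f m + 1 + ν := by
        have := pvConsumed_step f (m + 1) hf (by omega)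
        simpa using this
      rw [hinner]
      by_cases hc' : 0 < c - (1 + ν)
      · obtain ⟨M, hMeq, hMlt, hMge, hMle⟩ :=
          (ih (c - (1 + ν)) (m + 1) (by omega) (by omega)).1 hc'
        refine ⟨M, hMeq, by omega, by omega, ?_⟩
        intro M' h1 h2
        rcases eq_or_lt_of_le (show m + 1 ≤ M' by omega) with h3 | h3
        · rw [← h3]; omega
        · have := hMle M' h3 h2; omega
      · have heq := (ih (c - (1 + ν)) (m + 1) (by omega) (by omega)).2 (by omega)
        exact ⟨m + 1, heq, by omega, by omega, by intro M' h1 h2; omega⟩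
    · intro hc
      rw [pvOuterA, if_neg (by omega)]

-- the doubling loop returns hi with consumed(hi) ≥ count (fuel ≥ (count - hi).toNat suffices)
theorem pvGrowB_spec (f count : Int) (hf : 2 ≤ f) :
    ∀ (fuel : Nat) (hi : Int), 1 ≤ hi → (count - hi).toNat ≤ fuel →
      1 ≤ pvGrowB f count fuel hi ∧ count ≤ pvConsumed f (pvGrowB f count fuel hi) := by
  intro fuel
  induction fuel with
  | zero =>
    intro hi hhi hle
    have := pvConsumed_ge f hi hf (by omega)
    rw [pvGrowB]
    exact ⟨hhi, by omega⟩
  | succ n ih =>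
    intro hi hhi hle
    rw [pvGrowB]
    split_ifs with hlt
    · have hge := pvConsumed_ge f hi hf (by omega)
      exact ih (hi * 2) (by omega) (by omega)
    · exact ⟨hhi, by omega⟩

-- the bisection returns the least m ≥ lo with consumed(m) ≥ count (fuel ≥ (hi-lo).toNat suffices)
theorem pvBisectB_spec (f count : Int) (hf : 2 ≤ f) :
    ∀ (fuel : Nat) (lo hi : Int), 1 ≤ lo → lo ≤ hi → (hi - lo).toNat ≤ fuel →
      count ≤ pvConsumed f hi → (∀ m', 1 ≤ m' → m' < lo → pvConsumed f m' < count) →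
      lo ≤ pvBisectB f count fuel lo hi ∧ pvBisectB f count fuel lo hi ≤ hi ∧
        count ≤ pvConsumed f (pvBisectB f count fuel lo hi) ∧
        ∀ m', 1 ≤ m' → m' < pvBisectB f count fuel lo hi → pvConsumed f m' < count := by
  intro fuel
  induction fuel with
  | zero =>
    intro lo hi h1 h2 h3 h4 h5
    have heq : lo = hi := by omega
    rw [pvBisectB]
    exact ⟨le_refl lo, h2, by rw [heq]; exact h4, h5⟩
  | succ n ih =>
    intro lo hi h1 h2 h3 h4 h5
    rw [pvBisectB]
    by_cases hlh : lo < hi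
    · rw [if_pos hlh]
      dsimp only
      have hb := PySem.Int.floordiv_two_mid_bounds (le_of_lt hlh)
      have hlt : PySem.Int.floordiv (lo + hi) 2 < hi :=
        (PySem.Int.floordiv_lt_iff_lt_mul (by norm_num)).2 (by omega)
      split_ifs with hge
      · obtain ⟨k1, k2, k3, k4⟩ := ih lo _ h1 (by omega) (by omega) hge h5
        exact ⟨k1, by omega, k3, k4⟩
      · have h5' : ∀ m', 1 ≤ m' → m' < PySem.Int.floordiv (lo + hi) 2 + 1 →
            pvConsumed f m' < count := by
          intro m' hm1 hm2
          by_cases hm3 : m' < lo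
          · exact h5 m' hm1 hm3
          · calc pvConsumed f m' ≤ pvConsumed f (PySem.Int.floordiv (lo + hi) 2) :=
                  pvConsumed_mono f m' _ hf (by omega) (by omega)
              _ < count := by omega
        obtain ⟨k1, k2, k3, k4⟩ := ih _ hi (by omega) (by omega) (by omega) h4 h5'
        exact ⟨by omega, k2, k3, k4⟩
    · rw [if_neg hlh]
      have heq : lo = hi := by omega
      exact ⟨le_refl lo, h2, by rw [heq]; exact h4, h5⟩

-- ===== VERDICT (by name: the statement is the Claim_ definition above) =====
theorem min_N_for_factorial_spec : Claim_equal_min_N_for_factorial := by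
  intro factor count _ hpre
  unfold Spec_min_N_for_factorial min_N_for_factorial min_N_for_factorial_alt
  by_cases hc : count ≤ 0
  · rw [if_pos hc, show count.toNat = 0 from by omega, pvOuterA]
  · have hf : 2 ≤ factor := by
      rcases hpre with h | h
      · exact h
      · omega
    rw [if_neg hc]
    have hA := (pvOuterA_spec factor hf count.toNat count 0 (le_refl 0) (le_refl _)).1 (by omega)
    rw [zero_mul] at hA
    obtain ⟨M, hAeq, hM0, hMge, hMleast⟩ := hA
    rw [pvConsumed_zero factor hf] at hMge hMleast
    have hG := pvGrowB_spec factor count hf count.toNat 1 (by norm_num) (by omega)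
    set hi := pvGrowB factor count count.toNat 1 with hhi
    have hB := pvBisectB_spec factor count hf (hi - 1).toNat 1 hi (by norm_num) hG.1
      (by omega) hG.2 (by intro m' hm1 hm2; omega)
    set r := pvBisectB factor count (hi - 1).toNat 1 hi with hr
    obtain ⟨hr1, hr2, hrge, hrleast⟩ := hB
    have : M = r := by
      by_contra hne
      rcases lt_or_gt_of_ne hne with hlt | hgt
      · have := hrleast M (by omega) hlt; omega
      · have := hMleast r (by omega) hgt; omega
    rw [hAeq, this]
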